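-- pv_equiv track=rewrite | github.com/joshanashakya/dissertation | workspace/dataset/java-python/GeeksForGeeks/2446/A/2.py | answer
-- ===== SOURCE A (Python) =====
-- def answer(n):
--
--     # Start with 2 bits.
--     m = 2;
--
--     # initial answer is
--     # 1 which meets the
--     # given condition
--     ans = 1;
--     r = 1;
--
--     # check for all numbers
--     while r < n:
--
--         # compute the number
--         r = (int)((pow(2, m) - 1) *
--                   (pow(2, m - 1)));
--
--         # if less then N
--         if r < n:
--             ans = r;
--
--         # increment m to get
--         # the next number
--         m = m + 1;
--     return ans;
-- ===== SOURCE B (Python) =====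
-- def answer(n):
--     # Closed-form start: v(m) = ((1<<m)-1) << (m-1) has 2m-1 bits, so derive m
--     # from n's bit length and step down to the largest m with v(m) < n.
--     if n <= 6:
--         return 1
--     m = (n.bit_length() + 3) // 2
--     while ((1 << m) - 1) << (m - 1) >= n:
--         m -= 1
--     return ((1 << m) - 1) << (m - 1)
-- ===== Notes on version B (the rewrite author's own statement) =====
-- stated objective: alternative
-- what changed: Instead of scanning m upward from 2 with pow() until the candidate reaches n, B derives m directly from n.bit_length() with integer shifts and steps down by at most a couple of positions to the largest m with ((1<<m)-1)<<(m-1) < n.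
import Mathlib
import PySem

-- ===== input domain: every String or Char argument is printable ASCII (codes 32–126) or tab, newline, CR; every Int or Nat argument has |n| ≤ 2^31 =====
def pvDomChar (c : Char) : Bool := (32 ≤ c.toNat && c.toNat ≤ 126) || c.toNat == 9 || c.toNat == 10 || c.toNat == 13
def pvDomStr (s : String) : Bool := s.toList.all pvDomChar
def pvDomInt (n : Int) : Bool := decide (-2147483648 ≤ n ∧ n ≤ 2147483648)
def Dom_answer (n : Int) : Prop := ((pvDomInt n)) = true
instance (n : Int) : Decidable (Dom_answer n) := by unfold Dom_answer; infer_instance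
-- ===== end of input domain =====

-- B replaces A's upward scan by computing m from n's bit length and adjusting down; same value, similar cost (objective: alternative).

-- ===== PORT A =====
-- the candidate value (2^m - 1) * 2^(m-1), as computed in both Python programs
def pvV (m : Nat) : Int := (2 ^ m - 1) * 2 ^ (m - 1)

-- m ≤ v m, used only for termination of A's loop
theorem pvV_ge_self (m : Nat) : (m : Int) ≤ pvV m := by
  unfold pvV
  rcases Nat.eq_zero_or_pos m with h | h
  · subst h; simp
  · rcases Nat.exists_eq_add_of_le h with ⟨k, hk⟩
    subst hk
    have h1 : (1 + k : Int) ≤ 2 ^ k := by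
      have := Nat.lt_two_pow_self (n := k)
      have : 1 + k ≤ 2 ^ k := by omega
      exact_mod_cast this
    have h2 : (1 : Int) ≤ 2 ^ (1 + k) - 1 := by
      have : (2 : Int) ^ 1 ≤ 2 ^ (1 + k) := pow_le_pow_right₀ (by norm_num) (by omega)
      simp at this; omega
    have e : (1 + k - 1) = k := by omega
    rw [e]
    have hp : (0 : Int) < 2 ^ k := pow_pos (by norm_num) k
    push_cast
    nlinarith

-- A's while loop: about to run the body with current counter m; `ans` is returned when the freshly computed r is no longer < n
def answerGo (n : Int) (m : Nat) (ans : Int) : Int :=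
  let r := (2 ^ m - 1) * 2 ^ (m - 1)
  if r < n then answerGo n (m + 1) r else ans
termination_by (n.toNat - m)
decreasing_by
  have h1 : (m : Int) ≤ (2 ^ m - 1) * 2 ^ (m - 1) := pvV_ge_self m
  have : (m : Int) < n := by dsimp only at *; omega
  omega

def answer (n : Int) : Int :=
  -- m = 2; ans = 1; r = 1; while r < n: body
  if (1 : Int) < n then answerGo n 2 1 else 1

-- ===== PORT B =====
-- n.bit_length() for nonnegative n, ported by hand (exact for Nat input)
def pvBitLen (k : Nat) : Nat :=
  if k = 0 then 0 else pvBitLen (k / 2) + 1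
decreasing_by omega

-- the downward adjustment loop: while v m ≥ n: m -= 1  (the m = 0 test only makes the recursion total; B reaches v m < n before m = 0 since it runs with n > 6 and v 2 = 6)
def answerDown (n : Int) (m : Nat) : Nat :=
  if n ≤ (2 ^ m - 1) * 2 ^ (m - 1) then
    (if m = 0 then 0 else answerDown n (m - 1))
  else m

def answer_alt (n : Int) : Int :=
  if n ≤ 6 then 1
  else
    let m := answerDown n ((pvBitLen n.toNat + 3) / 2)
    (2 ^ m - 1) * 2 ^ (m - 1)

-- ===== PRECONDITION & SPEC =====
def Spec_answer (n : Int) (out : Int) : Prop := out = answer_alt n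
instance (n : Int) (out : Int) : Decidable (Spec_answer n out) := by unfold Spec_answer; infer_instance

-- ===== CLAIM (what is proved, stated in full; the proofs are below) =====
def Claim_equal_answer : Prop := ∀ (n : Int), Dom_answer n → Spec_answer n (answer n)

-- ===== LEMMAS AND PROOFS =====

theorem pvV_lt_succ (m : Nat) : pvV m < pvV (m + 1) := by
  unfold pvV
  rcases Nat.eq_zero_or_pos m with h | h
  · subst h; norm_num
  · rcases Nat.exists_eq_add_of_le h with ⟨k, hk⟩
    subst hk
    have hp : (0 : Int) < 2 ^ k := pow_pos (by norm_num) k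
    simp only [Nat.add_sub_cancel_left]
    have e1 : (2 : Int) ^ (1 + k) = 2 * 2 ^ k := by rw [pow_add]; ring
    have e2 : (2 : Int) ^ (1 + k + 1) = 4 * 2 ^ k := by rw [pow_add, pow_add]; ring
    have e3 : (1 + k + 1 - 1) = k + 1 := by omega
    rw [e1, e2, e3, pow_succ]
    nlinarith

theorem pvV_mono : StrictMono pvV := strictMono_nat_of_lt_succ pvV_lt_succ

theorem pvBitLen_bound (k : Nat) : k < 2 ^ pvBitLen k := by
  induction k using Nat.strong_induction_on with
  | _ k ih =>
    unfold pvBitLen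
    split
    · omega
    · have := ih (k / 2) (by omega)
      rw [pow_succ]; omega

-- v m0 ≥ n at B's starting point m0
theorem pvStart_ge (n : Int) (hn : 6 < n) :
    n ≤ pvV ((pvBitLen n.toNat + 3) / 2) := by
  set b := pvBitLen n.toNat with hb
  set m0 := (b + 3) / 2 with hm0
  have hbb : n.toNat < 2 ^ b := pvBitLen_bound n.toNat
  have hnI : n < (2 : Int) ^ b := by
    have ht : (n.toNat : Int) = n := Int.toNat_of_nonneg (by omega)
    have h2 : ((n.toNat : Int)) < (((2 : Nat)) : Int) ^ b := by exact_mod_cast hbb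
    have h3 : (((2 : Nat)) : Int) = (2 : Int) := by norm_num
    rw [h3] at h2
    omega
  have hm1 : 1 ≤ m0 := by omega
  have h2m : b ≤ 2 * m0 - 2 := by omega
  have h1 : (2 : Int) ^ b ≤ 2 ^ (2 * m0 - 2) := pow_le_pow_right₀ (by norm_num) h2m
  have h2 : (2 : Int) ^ (2 * m0 - 2) ≤ pvV m0 := by
    unfold pvV
    have e : 2 * m0 - 2 = (m0 - 1) + (m0 - 1) := by omega
    rw [e, pow_add]
    have hle : (2 : Int) ^ (m0 - 1) ≤ 2 ^ m0 - 1 := by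
      have e2 : (2 : Int) ^ m0 = 2 ^ (m0 - 1) * 2 := by
        rw [← pow_succ]; congr 1; omega
      have h1p : (1:Int) ≤ 2 ^ (m0 - 1) := one_le_pow₀ (by norm_num)
      omega
    have hp : (0 : Int) < 2 ^ (m0 - 1) := pow_pos (by norm_num) _
    nlinarith
  exact le_trans hnI.le (le_trans h1 h2)

-- the value answerDown stops at satisfies v M < n (for positive n)
theorem answerDown_lt (n : Int) (hn : 0 < n) (j : Nat) : pvV (answerDown n j) < n := by
  induction j using Nat.strong_induction_on with
  | _ j ih =>
    unfold answerDown
    split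
    · split
      · next h hj =>
        subst hj
        simp [pvV] at *
        omega
      · next h hj => exact ih (j - 1) (by omega)
    · next h => unfold pvV; omega

-- answerDown stops either at j itself or at an M with n ≤ v (M+1)
theorem answerDown_succ (n : Int) (j : Nat) :
    answerDown n j = j ∨ n ≤ pvV (answerDown n j + 1) := by
  induction j using Nat.strong_induction_on with
  | _ j ih =>
    unfold answerDown
    split
    · next h =>
      split
      · next hj => left; omega
      · next hj =>
        rcases ih (j - 1) (by omega) with h1 | h1
        · right; rw [h1]
          have : j - 1 + 1 = j := by omega
          rw [this]
          simpa [pvV] using h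
        · right; exact h1
    · left; rfl

-- A's loop reaches v M when started at any m ≤ M, given v M < n ≤ v (M+1)
theorem answerGo_eq (n : Int) (M : Nat) (hM : pvV M < n) (hM1 : n ≤ pvV (M + 1)) :
    ∀ (j m : Nat) (ans : Int), m + j = M → answerGo n m ans = pvV M := by
  intro j
  induction j with
  | zero =>
    intro m ans hm
    have hm' : M = m := by omega
    subst hm'
    rw [answerGo]
    rw [if_pos (show (2 ^ M - 1) * 2 ^ (M - 1) < n from hM)]
    rw [answerGo]
    rw [if_neg (show ¬ (2 ^ (M+1) - 1) * 2 ^ (M + 1 - 1) < n from by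
      have := hM1; unfold pvV at this; omega)]
    rfl
  | succ j ih =>
    intro m ans hm
    rw [answerGo]
    have hlt : pvV m < n := lt_of_le_of_lt (pvV_mono.monotone (by omega : m ≤ M)) hM
    rw [if_pos (show (2 ^ m - 1) * 2 ^ (m - 1) < n from hlt)]
    exact ih (m + 1) _ (by omega)

-- main equivalence
theorem answer_eq_alt (n : Int) : answer n = answer_alt n := by
  unfold answer answer_alt
  by_cases h6 : n ≤ 6
  · simp only [if_pos h6]
    by_cases h1 : (1 : Int) < n
    · simp only [if_pos h1]
      rw [answerGo]
      have : ¬ ((2:Int) ^ 2 - 1) * 2 ^ (2 - 1) < n := by norm_num; omega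
      simp only [if_neg this]
    · simp only [if_neg h1]
  · have h6 : 6 < n := by omega
    simp only [if_neg (not_le.mpr h6), if_pos (show (1:Int) < n by omega)]
    set m0 := (pvBitLen n.toNat + 3) / 2 with hm0
    set M := answerDown n m0 with hMdef
    have hMlt : pvV M < n := answerDown_lt n (by omega) m0
    have hstart : n ≤ pvV m0 := pvStart_ge n h6
    have hMne : M ≠ m0 := by
      intro h; rw [h] at hMlt; omega
    have hM1 : n ≤ pvV (M + 1) := by
      rcases answerDown_succ n m0 with h | h
      · exact absurd h hMne
      · exact h
    have hM2 : 2 ≤ M := by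
      by_contra h
      have : M + 1 ≤ 2 := by omega
      have := pvV_mono.monotone this
      have hv2 : pvV 2 = 6 := by unfold pvV; norm_num
      omega
    exact answerGo_eq n M hMlt hM1 (M - 2) 2 1 (by omega)

-- ===== VERDICT (by name: the statement is the Claim_ definition above) =====
theorem answer_spec : Claim_equal_answer := by
  intro n _
  unfold Spec_answer
  exact answer_eq_alt n
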